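-- pv_equiv track=rewrite | github.com/pabpache/Big_data_fundamentals | C2LSH_algorithm/submission.py | min_offset
-- ===== SOURCE A (Python) =====
-- def count_tag(data_vector,query_vector,offset,alpha_m):
--     counter=0
--     for i in range(len(query_vector)):    #length of query_vector and data_vector is the same
--         if abs(data_vector[i]-query_vector[i]) <= offset:
--             counter +=1
--     if counter<alpha_m:
--         return 0
--     else:
--         return 1
--
-- def min_offset(data_vector,query_vector,alpha_m):
--     #calculate the max difference between the components of data_vector and query_vector
--     length= len(query_vector)
--     max_difference=0
--     for i in range(length):
--         if abs(data_vector[i]-query_vector[i])>max_difference: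
--             max_difference= abs(data_vector[i]-query_vector[i])
--
--     #using binary search find the offset necessary to make data_vector a candidate of query_vector
--     maximum=max_difference
--     minimum=0
--     mid=0
--     while minimum<=maximum:
--         mid=(maximum + minimum)//2
--         curr_tag = count_tag(data_vector,query_vector,mid,alpha_m)    #this is '1' if the vector is a candidate with mid as the offset
--         if mid==0:
--             if curr_tag==1:
--                 return mid
--             else:
--                 minimum=mid+1
--         elif curr_tag==1:
--             if count_tag(data_vector,query_vector,mid-1,alpha_m)==0:
--                 return mid       #the minimal offset to be a candidate was reached
--             else:                #There is an offset less than mid that also make the vecor a candidate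
--                 maximum = mid-1
--         else:       #a higher offset is necessary to make the vector a candidate
--             minimum = mid+1
-- ===== SOURCE B (Python) =====
-- def min_offset(data_vector, query_vector, alpha_m):
--     # B: selection instead of binary search: the answer is the alpha_m-th
--     # smallest absolute componentwise difference.
--     if alpha_m <= 0:
--         return 0
--     diffs = [abs(d - q) for d, q in zip(data_vector, query_vector)]
--     if alpha_m > len(diffs):
--         return None
--     diffs.sort()
--     return diffs[alpha_m - 1]
-- ===== Notes on version B (the rewrite author's own statement) =====
-- stated objective: alternative
-- what changed: Replaces A's binary search over offsets (each probe rescanning both vectors) by direct order-statistic selection: the answer is the alpha_m-th smallest absolute componentwise difference, obtained by sorting the difference list once.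
import Mathlib
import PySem

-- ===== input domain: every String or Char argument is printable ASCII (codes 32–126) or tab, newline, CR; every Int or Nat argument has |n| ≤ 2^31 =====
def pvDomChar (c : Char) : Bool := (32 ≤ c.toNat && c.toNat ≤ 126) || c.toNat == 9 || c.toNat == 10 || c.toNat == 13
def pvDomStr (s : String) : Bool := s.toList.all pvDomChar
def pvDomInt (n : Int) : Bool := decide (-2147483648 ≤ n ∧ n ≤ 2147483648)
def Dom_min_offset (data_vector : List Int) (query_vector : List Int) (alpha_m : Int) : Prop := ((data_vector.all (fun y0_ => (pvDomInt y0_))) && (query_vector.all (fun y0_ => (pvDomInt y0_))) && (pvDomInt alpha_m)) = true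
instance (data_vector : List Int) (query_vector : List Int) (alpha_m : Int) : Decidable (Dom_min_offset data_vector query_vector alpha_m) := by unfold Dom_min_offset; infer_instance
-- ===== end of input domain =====

-- B replaces A's binary search over offsets by direct order-statistic selection
-- (sort the absolute differences once and index); alternative algorithm, similar cost.


-- ===== PORT A =====
def count_tag (data_vector query_vector : List Int) (offset alpha_m : Int) : Int :=
  let counter :=
    (PySem.List.pyRange 0 (query_vector.length : Int) 1).foldl
      (fun c i =>
        if |PySem.List.pyGetD data_vector i 0 - PySem.List.pyGetD query_vector i 0| ≤ offset
        then c + 1 else c) 0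
  if counter < alpha_m then 0 else 1

-- the while-loop of A's binary search
def bsearchA (data_vector query_vector : List Int) (alpha_m : Int)
    (minimum maximum : Int) : Option Int :=
  if h : minimum ≤ maximum then
    let mid := PySem.Int.floordiv (maximum + minimum) 2
    let curr_tag := count_tag data_vector query_vector mid alpha_m
    if mid = 0 then
      if curr_tag = 1 then some mid
      else bsearchA data_vector query_vector alpha_m (mid + 1) maximum
    else if curr_tag = 1 then
      if count_tag data_vector query_vector (mid - 1) alpha_m = 0 then some mid
      else bsearchA data_vector query_vector alpha_m minimum (mid - 1)
    else bsearchA data_vector query_vector alpha_m (mid + 1) maximum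
  else none
termination_by (maximum - minimum + 1).toNat
decreasing_by
  · have hb := PySem.Int.floordiv_two_mid_bounds (lo := minimum) (hi := maximum) h
    rw [Int.add_comm] at hb; omega
  · have hb := PySem.Int.floordiv_two_mid_bounds (lo := minimum) (hi := maximum) h
    rw [Int.add_comm] at hb; omega
  · have hb := PySem.Int.floordiv_two_mid_bounds (lo := minimum) (hi := maximum) h
    rw [Int.add_comm] at hb; omega

def min_offset (data_vector : List Int) (query_vector : List Int) (alpha_m : Int) : Option Int :=
  let max_difference :=
    (PySem.List.pyRange 0 (query_vector.length : Int) 1).foldl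
      (fun m i =>
        if |PySem.List.pyGetD data_vector i 0 - PySem.List.pyGetD query_vector i 0| > m
        then |PySem.List.pyGetD data_vector i 0 - PySem.List.pyGetD query_vector i 0| else m) 0
  bsearchA data_vector query_vector alpha_m 0 max_difference

-- ===== PORT B =====
def min_offset_alt (data_vector : List Int) (query_vector : List Int) (alpha_m : Int) : Option Int :=
  if alpha_m ≤ 0 then some 0
  else
    let diffs := (data_vector.zip query_vector).map (fun p => |p.1 - p.2|)
    if alpha_m > (diffs.length : Int) then none
    else PySem.List.pyGet? (PySem.List.sorted diffs (fun x => x) false) (alpha_m - 1)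

-- ===== PRECONDITION & SPEC =====
-- Pre_ excludes exactly the inputs where A raises IndexError: data_vector shorter than query_vector.
def Pre_min_offset (data_vector : List Int) (query_vector : List Int) (alpha_m : Int) : Prop :=
  query_vector.length ≤ data_vector.length
instance (data_vector : List Int) (query_vector : List Int) (alpha_m : Int) : Decidable (Pre_min_offset data_vector query_vector alpha_m) := by unfold Pre_min_offset; infer_instance
def pvWitness_min_offset : List Int × List Int × Int := ([1, 5, 9], [2, 2, 2], 2)

def Spec_min_offset (data_vector : List Int) (query_vector : List Int) (alpha_m : Int) (out : Option Int) : Prop := out = min_offset_alt data_vector query_vector alpha_m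
instance (data_vector : List Int) (query_vector : List Int) (alpha_m : Int) (out : Option Int) : Decidable (Spec_min_offset data_vector query_vector alpha_m out) := by unfold Spec_min_offset; infer_instance

-- ===== CLAIM (what is proved, stated in full; the proofs are below) =====
def Claim_equal_min_offset : Prop := ∀ (data_vector : List Int) (query_vector : List Int) (alpha_m : Int), Dom_min_offset data_vector query_vector alpha_m → Pre_min_offset data_vector query_vector alpha_m → Spec_min_offset data_vector query_vector alpha_m (min_offset data_vector query_vector alpha_m)
-- ===== LEMMAS AND PROOFS =====

-- the list of absolute componentwise differences (B's `diffs`)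
def pvDiffs (d q : List Int) : List Int := (d.zip q).map (fun p => |p.1 - p.2|)

-- how many differences are within offset t
def pvCnt (d q : List Int) (t : Int) : Int := ((pvDiffs d q).countP (fun x => decide (x ≤ t)) : Int)

lemma range_map_eq_diffs (d q : List Int) (hq : q.length ≤ d.length) :
    (PySem.List.pyRange 0 (q.length : Int) 1).map
      (fun i => |PySem.List.pyGetD d i 0 - PySem.List.pyGetD q i 0|) = pvDiffs d q := by
  apply List.ext_getElem
  · simp [pvDiffs, PySem.List.length_pyRange_one]
    omega
  · intro k h1 h2
    have hk : k < q.length := by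
      simp [pvDiffs, List.length_zip] at h2; omega
    have hkd : k < d.length := lt_of_lt_of_le hk hq
    simp only [List.getElem_map, pvDiffs]
    rw [PySem.List.getElem_pyRange_one, List.getElem_zip, zero_add,
        PySem.List.pyGetD_natCast, PySem.List.pyGetD_natCast,
        List.getD_eq_getElem d 0 hkd, List.getD_eq_getElem q 0 hk]

lemma count_tag_eq (d q : List Int) (hq : q.length ≤ d.length) (t am : Int) :
    count_tag d q t am = if pvCnt d q t < am then 0 else 1 := by
  unfold count_tag
  have hc : (PySem.List.pyRange 0 (q.length : Int) 1).foldl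
      (fun c i => if |PySem.List.pyGetD d i 0 - PySem.List.pyGetD q i 0| ≤ t then c + 1 else c) 0
      = pvCnt d q t := by
    rw [PySem.List.foldl_ite_add_one
        (fun i => |PySem.List.pyGetD d i 0 - PySem.List.pyGetD q i 0| ≤ t)
        (PySem.List.pyRange 0 (q.length : Int) 1) 0]
    have : List.countP (fun x => decide (x ≤ t))
        ((PySem.List.pyRange 0 (q.length : Int) 1).map
          (fun i => |PySem.List.pyGetD d i 0 - PySem.List.pyGetD q i 0|))
        = List.countP
          (fun i => decide (|PySem.List.pyGetD d i 0 - PySem.List.pyGetD q i 0| ≤ t))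
          (PySem.List.pyRange 0 (q.length : Int) 1) := by
      rw [List.countP_map]; rfl
    rw [range_map_eq_diffs d q hq] at this
    unfold pvCnt
    rw [← this, zero_add]
  rw [hc]

lemma pvCnt_mono (d q : List Int) {t t' : Int} (h : t ≤ t') : pvCnt d q t ≤ pvCnt d q t' := by
  unfold pvCnt
  exact_mod_cast List.countP_mono_left (fun x _ hx => by
    simp only [decide_eq_true_eq] at *; omega)

lemma pvCnt_nonneg (d q : List Int) (t : Int) : 0 ≤ pvCnt d q t := by
  unfold pvCnt; positivity

lemma pvCnt_le_len (d q : List Int) (t : Int) : pvCnt d q t ≤ ((pvDiffs d q).length : Int) := by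
  unfold pvCnt
  exact_mod_cast List.countP_le_length

lemma foldl_max_bounds (g : Int → Int) (l : List Int) (a : Int) :
    a ≤ l.foldl (fun m i => if g i > m then g i else m) a
    ∧ ∀ i ∈ l, g i ≤ l.foldl (fun m i => if g i > m then g i else m) a := by
  induction l generalizing a with
  | nil => simp
  | cons y l ih =>
    refine ⟨?_, ?_⟩
    · simp only [List.foldl_cons]
      exact le_trans (by split_ifs <;> omega) (ih (if g y > a then g y else a)).1
    · intro i hi
      simp only [List.foldl_cons]
      rcases List.mem_cons.mp hi with rfl | hi
      · exact le_trans (by split_ifs <;> omega) (ih _).1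
      · exact (ih _).2 i hi

-- A's first loop computes an upper bound on all differences, and it is ≥ 0
lemma maxdiff_spec (d q : List Int) (hq : q.length ≤ d.length) :
    0 ≤ (PySem.List.pyRange 0 (q.length : Int) 1).foldl
      (fun m i =>
        if |PySem.List.pyGetD d i 0 - PySem.List.pyGetD q i 0| > m
        then |PySem.List.pyGetD d i 0 - PySem.List.pyGetD q i 0| else m) 0
    ∧ ∀ x ∈ pvDiffs d q, x ≤ (PySem.List.pyRange 0 (q.length : Int) 1).foldl
      (fun m i =>
        if |PySem.List.pyGetD d i 0 - PySem.List.pyGetD q i 0| > m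
        then |PySem.List.pyGetD d i 0 - PySem.List.pyGetD q i 0| else m) 0 := by
  have h := foldl_max_bounds
    (fun i => |PySem.List.pyGetD d i 0 - PySem.List.pyGetD q i 0|)
    (PySem.List.pyRange 0 (q.length : Int) 1) 0
  refine ⟨h.1, ?_⟩
  intro x hx
  rw [← range_map_eq_diffs d q hq] at hx
  obtain ⟨i, hi, rfl⟩ := List.mem_map.mp hx
  exact h.2 i hi

-- the binary search returns none when no offset ever works
lemma bsearchA_none (d q : List Int) (hq : q.length ≤ d.length) (am : Int)
    (hno : ∀ t : Int, pvCnt d q t < am) :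
    ∀ lo hi : Int, bsearchA d q am lo hi = none := by
  have key : ∀ n : Nat, ∀ lo hi : Int, (hi - lo + 1).toNat ≤ n →
      bsearchA d q am lo hi = none := by
    intro n
    induction n with
    | zero =>
      intro lo hi hlen
      rw [bsearchA, dif_neg (by omega)]
    | succ n ih =>
      intro lo hi hlen
      rw [bsearchA]
      by_cases h : lo ≤ hi
      · rw [dif_pos h]
        have hb := PySem.Int.floordiv_two_mid_bounds (lo := lo) (hi := hi) h
        rw [Int.add_comm] at hb
        have hct : ∀ u : Int, count_tag d q u am = 0 := fun u => by
          rw [count_tag_eq d q hq, if_pos (hno u)]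
        simp only [hct]
        norm_num
        exact ih _ _ (by omega)
      · rw [dif_neg h]
  intro lo hi
  exact key _ lo hi le_rfl

-- the binary search finds the minimal nonnegative admissible offset
lemma bsearchA_finds (d q : List Int) (hq : q.length ≤ d.length) (am v : Int)
    (hv0 : 0 ≤ v) (hPv : am ≤ pvCnt d q v)
    (hmin : ∀ t : Int, 0 ≤ t → t < v → pvCnt d q t < am) :
    ∀ lo hi : Int, 0 ≤ lo → lo ≤ v → v ≤ hi → bsearchA d q am lo hi = some v := by
  have key : ∀ n : Nat, ∀ lo hi : Int, (hi - lo + 1).toNat ≤ n → 0 ≤ lo → lo ≤ v → v ≤ hi →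
      bsearchA d q am lo hi = some v := by
    intro n
    induction n with
    | zero => intro lo hi hlen h0 h1 h2; omega
    | succ n ih =>
      intro lo hi hlen h0 h1 h2
      have h : lo ≤ hi := le_trans h1 h2
      rw [bsearchA, dif_pos h]
      have hb := PySem.Int.floordiv_two_mid_bounds (lo := lo) (hi := hi) h
      rw [Int.add_comm] at hb
      simp only []
      generalize hmideq : PySem.Int.floordiv (hi + lo) 2 = mid at hb ⊢
      by_cases hP : am ≤ pvCnt d q mid
      · have e1 : count_tag d q mid am = 1 := by
          rw [count_tag_eq d q hq, if_neg (not_lt.mpr hP)]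
        have hvmid : v ≤ mid := by
          by_contra hc
          exact absurd hP (not_le.mpr (hmin mid (by omega) (by omega)))
        by_cases hm0 : mid = 0
        · have hv : v = 0 := by omega
          rw [hm0] at e1
          simp [e1, hm0, hv]
        · by_cases hP1 : am ≤ pvCnt d q (mid - 1)
          · have e2 : count_tag d q (mid - 1) am = 1 := by
              rw [count_tag_eq d q hq, if_neg (not_lt.mpr hP1)]
            have hv1 : v ≤ mid - 1 := by
              by_contra hc
              exact absurd hP1 (not_le.mpr (hmin (mid - 1) (by omega) (by omega)))
            simp only [e1, e2, if_neg hm0]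
            norm_num
            exact ih lo (mid - 1) (by omega) h0 h1 hv1
          · have e2 : count_tag d q (mid - 1) am = 0 := by
              rw [count_tag_eq d q hq, if_pos (not_le.mp hP1)]
            have hv1 : mid - 1 < v := by
              by_contra hc
              push_neg at hc
              exact hP1 (le_trans hPv (pvCnt_mono d q hc))
            have hv : v = mid := by omega
            simp [e1, e2, hm0, hv]
      · have e1 : count_tag d q mid am = 0 := by
          rw [count_tag_eq d q hq, if_pos (not_le.mp hP)]
        have hv1 : mid + 1 ≤ v := by
          by_contra hc
          exact hP (le_trans hPv (pvCnt_mono d q (by omega)))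
        simp only [e1]
        norm_num
        exact ih (mid + 1) hi (by omega) (by omega) hv1 h2
  intro lo hi h0 h1 h2
  exact key _ lo hi le_rfl h0 h1 h2

-- characterisation of the sorted selection: it is admissible and minimal
lemma selection_spec (d q : List Int) (am : Int)
    (h1 : 1 ≤ am) (h2 : am ≤ ((pvDiffs d q).length : Int)) :
    let s := PySem.List.sorted (pvDiffs d q) (fun x => x) false
    let k := (am - 1).toNat
    ∀ hk : k < s.length,
      (am ≤ pvCnt d q (s[k]'hk) ∧ ∀ t : Int, 0 ≤ t → t < s[k]'hk → pvCnt d q t < am) := by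
  intro s k hk
  have hperm : s.Perm (pvDiffs d q) := PySem.List.sorted_perm _ _ _
  have hlen : s.length = (pvDiffs d q).length := PySem.List.length_sorted _ _ _
  have hcnt : ∀ t : Int, pvCnt d q t = (s.countP (fun x => decide (x ≤ t)) : Int) := by
    intro t
    unfold pvCnt
    rw [hperm.countP_eq]
  constructor
  · rw [hcnt]
    have hsum := List.countP_append (p := fun x => decide (x ≤ s[k]'hk))
      (l₁ := s.take (k + 1)) (l₂ := s.drop (k + 1))
    rw [List.take_append_drop] at hsum
    have hlt : (s.take (k + 1)).length = k + 1 := by rw [List.length_take]; omega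
    have hall : (s.take (k + 1)).countP (fun x => decide (x ≤ s[k]'hk))
        = (s.take (k + 1)).length := by
      rw [List.countP_eq_length]
      intro a ha
      obtain ⟨j, hj, rfl⟩ := List.mem_iff_getElem.mp ha
      have hjk : j ≤ k := by rw [List.length_take] at hj; omega
      rw [List.getElem_take]
      simp only [decide_eq_true_eq]
      exact PySem.List.sorted_id_getElem_mono (pvDiffs d q) hjk hk
    have hkk : k = (am - 1).toNat := rfl
    omega
  · intro t ht0 htv
    rw [hcnt]
    have hdrop : (s.drop k).countP (fun x => decide (x ≤ t)) = 0 := by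
      rw [List.countP_eq_zero]
      intro a ha
      obtain ⟨j, hj, rfl⟩ := List.mem_iff_getElem.mp ha
      have hjlen : k + j < s.length := by rw [List.length_drop] at hj; omega
      rw [List.getElem_drop]
      simp only [decide_eq_true_eq, not_le]
      have hmono : s[k]'hk ≤ s[k + j]'hjlen :=
        PySem.List.sorted_id_getElem_mono (pvDiffs d q) (Nat.le_add_right k j) hjlen
      omega
    have hsum := List.countP_append (p := fun x => decide (x ≤ t))
      (l₁ := s.take k) (l₂ := s.drop k)
    rw [List.take_append_drop] at hsum
    have hle := List.countP_le_length (p := fun x : Int => decide (x ≤ t)) (l := s.take k)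
    rw [List.length_take] at hle
    have hkk : k = (am - 1).toNat := rfl
    omega

-- ===== VERDICT (by name: the statement is the Claim_ definition above) =====
theorem min_offset_spec : Claim_equal_min_offset := by
  intro d q am _ hpre
  unfold Spec_min_offset Pre_min_offset at *
  unfold min_offset min_offset_alt
  simp only []
  rw [show ((d.zip q).map (fun p : Int × Int => |p.1 - p.2|)) = pvDiffs d q from rfl]
  have hlend : (pvDiffs d q).length = q.length := by
    simp [pvDiffs, List.length_zip]; omega
  have hmax := maxdiff_spec d q hpre
  by_cases ham0 : am ≤ 0
  · -- v = 0
    rw [bsearchA_finds d q hpre am 0 le_rfl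
        (le_trans ham0 (pvCnt_nonneg d q 0)) (fun t ht0 htv => absurd htv (by omega))
        0 _ le_rfl le_rfl hmax.1]
    rw [if_pos ham0]
  · by_cases hambig : am > ((pvDiffs d q).length : Int)
    · rw [bsearchA_none d q hpre am
        (fun t => lt_of_le_of_lt (pvCnt_le_len d q t) hambig)]
      rw [if_neg ham0, if_pos hambig]
    · push_neg at hambig
      have h1 : 1 ≤ am := by omega
      have hk : (am - 1).toNat < (PySem.List.sorted (pvDiffs d q) (fun x => x) false).length := by
        rw [PySem.List.length_sorted]; omega
      have hsel := selection_spec d q am h1 hambig hk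
      set s := PySem.List.sorted (pvDiffs d q) (fun x => x) false with hs
      set k := (am - 1).toNat with hkdef
      have hmem : s[k]'hk ∈ pvDiffs d q :=
        (PySem.List.mem_sorted (pvDiffs d q) (fun x => x) false _).mp (List.getElem_mem hk)
      have hv0 : 0 ≤ s[k]'hk := by
        obtain ⟨p, _, hpe⟩ := List.mem_map.mp hmem
        rw [← hpe]
        exact abs_nonneg _
      have hvmax := hmax.2 (s[k]'hk) hmem
      rw [bsearchA_finds d q hpre am (s[k]'hk) hv0 hsel.1 hsel.2 0 _ le_rfl hv0 hvmax]
      rw [if_neg ham0, if_neg (by omega)]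
      rw [show am - 1 = ((am - 1).toNat : Int) by omega, PySem.List.pyGet?_natCast, ← hkdef,
          List.getElem?_eq_getElem hk]
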